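-- pv_equiv track=rewrite | github.com/arknave/project-euler | python/pe348.py | gen_palindromes
-- ===== SOURCE A (Python) =====
-- def gen_palindromes(msb):
--     def inner(lo, hi, cur):
--         if lo > hi:
--             yield cur
--         else:
--             start = int(lo == 1)
--             mul = lo if lo == hi else (lo + hi)
--             for d in range(start, 10):
--                 yield from inner(lo * 10, hi // 10, cur + d * mul)
--
--     yield from inner(1, msb, 0)
-- ===== SOURCE B (Python) =====
-- def gen_palindromes(msb):
--     # build the place-value table once: (first-digit start, multiplier) per level
--     table = []
--     lo, hi = 1, msb
--     while lo <= hi: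
--         table.append((1 if lo == 1 else 0, lo if lo == hi else lo + hi))
--         lo *= 10
--         hi //= 10
--     # level-order product expansion: outermost digit varies slowest, like A
--     sums = [0]
--     for start, mul in table:
--         sums = [s + d * mul for s in sums for d in range(start, 10)]
--     yield from sums
-- ===== Notes on version B (the rewrite author's own statement) =====
-- stated objective: alternative
-- what changed: Replaces the digit-by-digit recursive generator with a precomputed (start, multiplier) table built in one descent plus an iterative level-order product expansion of partial sums.
import Mathlib
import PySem

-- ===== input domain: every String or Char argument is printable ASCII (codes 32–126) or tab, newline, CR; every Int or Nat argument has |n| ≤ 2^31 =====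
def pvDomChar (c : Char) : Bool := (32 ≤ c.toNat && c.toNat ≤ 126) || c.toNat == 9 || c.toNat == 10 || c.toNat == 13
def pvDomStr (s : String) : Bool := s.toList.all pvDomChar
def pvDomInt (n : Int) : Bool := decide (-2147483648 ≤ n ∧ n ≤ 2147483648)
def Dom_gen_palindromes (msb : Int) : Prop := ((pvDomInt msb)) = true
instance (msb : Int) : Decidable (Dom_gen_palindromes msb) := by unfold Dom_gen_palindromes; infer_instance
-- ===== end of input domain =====

-- B replaces A's digit-by-digit recursion with a precomputed (start, multiplier) table
-- plus an iterative level-order product expansion of partial sums (alternative decomposition, same cost).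


-- ===== PORT A =====
-- inner(lo, hi, cur): the fuel argument only makes the recursion total in Lean
-- (msb.natAbs + 1 levels are always enough, proved below); each step is A's code.
def pvInnerA (fuel : Nat) (lo hi cur : Int) : List Int :=
  match fuel with
  | 0 => []
  | f + 1 =>
    if lo > hi then [cur]
    else
      let start : Int := if lo = 1 then 1 else 0
      let mul : Int := if lo = hi then lo else lo + hi
      (PySem.List.pyRange start 10 1).flatMap
        (fun d => pvInnerA f (lo * 10) (PySem.Int.floordiv hi 10) (cur + d * mul))

def gen_palindromes (msb : Int) : List Int :=
  pvInnerA (msb.natAbs + 1) 1 msb 0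

-- ===== PORT B =====
-- the while loop building the (start, mul) table (fuel for totality, as above)
def pvTableB (fuel : Nat) (lo hi : Int) : List (Int × Int) :=
  match fuel with
  | 0 => []
  | f + 1 =>
    if lo ≤ hi then
      ((if lo = 1 then (1 : Int) else 0), (if lo = hi then lo else lo + hi))
        :: pvTableB f (lo * 10) (PySem.Int.floordiv hi 10)
    else []

-- the 'for start, mul in table' loop expanding the partial sums
def pvExpandB (sums : List Int) (table : List (Int × Int)) : List Int :=
  table.foldl
    (fun sums sm =>
      sums.flatMap (fun s => (PySem.List.pyRange sm.1 10 1).map (fun d => s + d * sm.2)))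
    sums

def gen_palindromes_alt (msb : Int) : List Int :=
  pvExpandB [0] (pvTableB (msb.natAbs + 1) 1 msb)

-- ===== PRECONDITION & SPEC =====
def Spec_gen_palindromes (msb : Int) (out : List Int) : Prop := out = gen_palindromes_alt msb
instance (msb : Int) (out : List Int) : Decidable (Spec_gen_palindromes msb out) := by unfold Spec_gen_palindromes; infer_instance

-- ===== CLAIM (what is proved, stated in full; the proofs are below) =====
def Claim_equal_gen_palindromes : Prop := ∀ (msb : Int), Dom_gen_palindromes msb → Spec_gen_palindromes msb (gen_palindromes msb)

-- ===== LEMMAS AND PROOFS =====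

theorem pvExpandB_append (t : List (Int × Int)) (a b : List Int) :
    pvExpandB (a ++ b) t = pvExpandB a t ++ pvExpandB b t := by
  induction t generalizing a b with
  | nil => simp [pvExpandB]
  | cons sm t ih =>
    simp only [pvExpandB, List.foldl_cons, List.flatMap_append] at *
    exact ih _ _

theorem pvExpandB_flatMap (t : List (Int × Int)) (xs : List Int) :
    pvExpandB xs t = xs.flatMap (fun x => pvExpandB [x] t) := by
  induction xs with
  | nil =>
    induction t with
    | nil => simp [pvExpandB]
    | cons sm t ih => simpa [pvExpandB, List.foldl_cons] using ih
  | cons x xs ih =>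
    have h : x :: xs = [x] ++ xs := rfl
    rw [h, pvExpandB_append, ih]; simp

theorem pvNatAbs_floordiv_lt (hi : Int) (h : 1 ≤ hi) :
    (PySem.Int.floordiv hi 10).natAbs < hi.natAbs := by
  rw [PySem.Int.floordiv_eq_ediv_of_pos (by omega)]
  have h1 : 0 ≤ hi / 10 := Int.ediv_nonneg (by omega) (by omega)
  have h2 : hi / 10 * 10 ≤ hi := Int.ediv_mul_le hi (by norm_num)
  omega

theorem pvInnerA_eq_expand (fuel : Nat) (lo hi cur : Int)
    (hlo : 1 ≤ lo) (hfu : hi.natAbs < fuel) :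
    pvInnerA fuel lo hi cur = pvExpandB [cur] (pvTableB fuel lo hi) := by
  induction fuel generalizing lo hi cur with
  | zero => omega
  | succ f ih =>
    by_cases hgt : lo > hi
    · simp [pvInnerA, pvTableB, pvExpandB, hgt, not_le.mpr hgt]
    · have hle : lo ≤ hi := not_lt.mp hgt
      have hhi : 1 ≤ hi := le_trans hlo hle
      have hrec : (PySem.Int.floordiv hi 10).natAbs < f := by
        have := pvNatAbs_floordiv_lt hi hhi
        omega
      simp only [pvInnerA, pvTableB, hgt, hle, if_pos]
      rw [pvExpandB]
      simp only [List.foldl_cons]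
      have hstep :
          ([cur].flatMap (fun s => (PySem.List.pyRange (if lo = 1 then (1:Int) else 0) 10 1).map
              (fun d => s + d * (if lo = hi then lo else lo + hi))))
            = (PySem.List.pyRange (if lo = 1 then (1:Int) else 0) 10 1).map
              (fun d => cur + d * (if lo = hi then lo else lo + hi)) := by
        simp
      show _ = pvExpandB _ (pvTableB f (lo * 10) (PySem.Int.floordiv hi 10))
      rw [hstep, pvExpandB_flatMap _ (List.map _ _), List.flatMap_map]
      exact List.flatMap_congr (fun d _ => ih (lo * 10) (PySem.Int.floordiv hi 10) _ (by omega) hrec)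

-- ===== VERDICT (by name: the statement is the Claim_ definition above) =====
theorem gen_palindromes_spec : Claim_equal_gen_palindromes := by
  intro msb _
  unfold Spec_gen_palindromes gen_palindromes gen_palindromes_alt
  exact pvInnerA_eq_expand _ 1 msb 0 le_rfl (by omega)
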